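-- pv_equiv track=rewrite | github.com/charlesfranciscodev/codingame | puzzles/python3/mayan_calc.py | convert_base10_to_20
-- ===== SOURCE A (Python) =====
-- from typing import Dict, List
--
-- BASE = 20
--
-- def convert_base10_to_20(number: int) -> List[int]:
--     num_list: List[int] = []
--     # avoid division by 0
--     if number == 0:
--         num_list.append(0)
--         return num_list
--
--     while number != 0:
--         num_list.append(number % BASE)  # remainder
--         number //= BASE
--
--     return num_list[::-1]
-- ===== SOURCE B (Python) =====
-- BASE = 20
--
-- def convert_base10_to_20(number):
--     # Recursive most-significant-digit-first decomposition (no accumulate-then-reverse).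
--     if 0 <= number < BASE:
--         return [number]
--     return convert_base10_to_20(number // BASE) + [number % BASE]
-- ===== Notes on version B (the rewrite author's own statement) =====
-- stated objective: simpler
-- what changed: Replaced the append-remainders-then-reverse while loop with a direct recursion that emits the most significant digit first (base case 0 <= n < 20), removing the reversal and the special zero case.
import Mathlib
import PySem

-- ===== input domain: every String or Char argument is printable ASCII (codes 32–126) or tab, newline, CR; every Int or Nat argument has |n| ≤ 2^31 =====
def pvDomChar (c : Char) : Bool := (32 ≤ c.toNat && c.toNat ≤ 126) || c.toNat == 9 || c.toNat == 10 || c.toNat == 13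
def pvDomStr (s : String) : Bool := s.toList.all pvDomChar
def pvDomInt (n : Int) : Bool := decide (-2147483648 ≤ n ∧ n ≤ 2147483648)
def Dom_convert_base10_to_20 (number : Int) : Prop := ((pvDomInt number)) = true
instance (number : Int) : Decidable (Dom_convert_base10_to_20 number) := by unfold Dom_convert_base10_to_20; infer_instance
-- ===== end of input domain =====

-- B replaces A's append-remainders-then-reverse loop with a direct MSD-first recursion (objective: simpler).
-- Equivalence is claimed on nonnegative inputs only: on negative inputs A's while loop never terminates.

-- ===== PORT A =====
-- A's while loop; the 'number ≤ 0' guard only makes the Lean function total (the loop body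
-- is reached exactly when number ≠ 0, and Pre_ restricts to 0 ≤ number where both agree).
def convert_base10_to_20_loop (number : Int) (num_list : List Int) : List Int :=
  if number ≤ 0 then num_list
  else convert_base10_to_20_loop (PySem.Int.floordiv number 20)
         (num_list ++ [PySem.Int.mod number 20])
termination_by number.toNat
decreasing_by
  have h : ¬ number ≤ 0 := by assumption
  have := PySem.Int.floordiv_eq_ediv_of_pos (a := number) (b := 20) (by omega)
  omega

def convert_base10_to_20 (number : Int) : List Int :=
  if number = 0 then [0]
  else (convert_base10_to_20_loop number []).reverse  -- num_list[::-1]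

-- ===== PORT B =====
-- B's recursion; the base-case test 'number < 20' (vs Python's 0 <= number < 20) only makes
-- the Lean function total (Python B hits RecursionError on negatives, outside Pre_).
def convert_base10_to_20_alt (number : Int) : List Int :=
  if number < 20 then [number]
  else convert_base10_to_20_alt (PySem.Int.floordiv number 20) ++ [PySem.Int.mod number 20]
termination_by number.toNat
decreasing_by
  have h : ¬ number < 20 := by assumption
  have := PySem.Int.floordiv_eq_ediv_of_pos (a := number) (b := 20) (by omega)
  omega

-- ===== PRECONDITION & SPEC =====
-- Pre_ excludes negative inputs: there A's while loop never terminates (number //= 20 stays -1).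
def Pre_convert_base10_to_20 (number : Int) : Prop := 0 ≤ number
instance (number : Int) : Decidable (Pre_convert_base10_to_20 number) := by unfold Pre_convert_base10_to_20; infer_instance
def pvWitness_convert_base10_to_20 : Int := (12345)

def Spec_convert_base10_to_20 (number : Int) (out : List Int) : Prop := out = convert_base10_to_20_alt number
instance (number : Int) (out : List Int) : Decidable (Spec_convert_base10_to_20 number out) := by unfold Spec_convert_base10_to_20; infer_instance

-- ===== CLAIM =====
def Claim_equal_convert_base10_to_20 : Prop := ∀ (number : Int), Dom_convert_base10_to_20 number → Pre_convert_base10_to_20 number → Spec_convert_base10_to_20 number (convert_base10_to_20 number)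

-- ===== LEMMAS AND PROOFS =====

-- A's loop, run from a positive number, appends exactly B's digit list reversed.
theorem loop_eq_alt_reverse (number : Int) (h : 0 < number) (acc : List Int) :
    convert_base10_to_20_loop number acc = acc ++ (convert_base10_to_20_alt number).reverse := by
  by_cases hlt : number < 20
  · rw [convert_base10_to_20_loop, convert_base10_to_20_loop, convert_base10_to_20_alt]
    have hq : PySem.Int.floordiv number 20 = 0 := by
      rw [PySem.Int.floordiv_eq_ediv_of_pos (by omega)]; omega
    have hm : PySem.Int.mod number 20 = number := by
      rw [PySem.Int.mod_eq_emod_of_pos (by omega)]; omega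
    rw [convert_base10_to_20_loop, if_neg (by omega : ¬ number ≤ 0), hq, hm,
        convert_base10_to_20_loop, if_pos le_rfl, convert_base10_to_20_alt, if_pos hlt]
    simp
  · have hq : PySem.Int.floordiv number 20 = number / 20 :=
      PySem.Int.floordiv_eq_ediv_of_pos (by omega)
    have hqpos : 0 < PySem.Int.floordiv number 20 := by rw [hq]; omega
    rw [convert_base10_to_20_loop, if_neg (by omega : ¬ number ≤ 0),
        loop_eq_alt_reverse _ hqpos]
    conv_rhs => rw [convert_base10_to_20_alt]
    rw [if_neg hlt]
    simp
termination_by number.toNat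
decreasing_by
  have := PySem.Int.floordiv_eq_ediv_of_pos (a := number) (b := 20) (by omega : (0:Int) < 20)
  omega

-- ===== VERDICT =====
theorem convert_base10_to_20_spec : Claim_equal_convert_base10_to_20 := by
  intro number _ hpre
  unfold Pre_convert_base10_to_20 at hpre
  unfold Spec_convert_base10_to_20 convert_base10_to_20
  by_cases h0 : number = 0
  · subst h0; simp [convert_base10_to_20_alt]
  · rw [if_neg h0, loop_eq_alt_reverse number (by omega) []]
    simp
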